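-- pv_equiv track=rewrite | github.com/aorursy/KT_dataset_py | dariashalahinova_gauss-method-partly.py | find_row_index
-- ===== SOURCE A (Python) =====
-- def find_row_index(matrix, col_numbder):
--
--     if col_numbder > len(matrix) - 1:
--
--         return
--
--     max_v = abs(matrix[col_numbder][col_numbder])
--
--     max_i = col_numbder
--
--     for i in range(col_numbder, len(matrix)):
--
--         # ищем максимальный элемент
--
--         if abs(matrix[i][col_numbder]) > max_v:
--
--             max_v = abs(matrix[i][col_numbder])
--
--             max_i = i
--
--     return max_i
-- ===== SOURCE B (Python) =====
-- def find_row_index(matrix, col_numbder):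
--     if col_numbder > len(matrix) - 1:
--         return
--     col_abs = [abs(matrix[i][col_numbder]) for i in range(col_numbder, len(matrix))]
--     m = max(col_abs)
--     return col_numbder + col_abs.index(m)
-- ===== Notes on version B (the rewrite author's own statement) =====
-- stated objective: alternative
-- what changed: replaces the single running-max loop carrying (max_v, max_i) state with three stateless passes: build the list of absolute column values, take its max, then locate the first index of that max and add the row offset
import Mathlib
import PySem

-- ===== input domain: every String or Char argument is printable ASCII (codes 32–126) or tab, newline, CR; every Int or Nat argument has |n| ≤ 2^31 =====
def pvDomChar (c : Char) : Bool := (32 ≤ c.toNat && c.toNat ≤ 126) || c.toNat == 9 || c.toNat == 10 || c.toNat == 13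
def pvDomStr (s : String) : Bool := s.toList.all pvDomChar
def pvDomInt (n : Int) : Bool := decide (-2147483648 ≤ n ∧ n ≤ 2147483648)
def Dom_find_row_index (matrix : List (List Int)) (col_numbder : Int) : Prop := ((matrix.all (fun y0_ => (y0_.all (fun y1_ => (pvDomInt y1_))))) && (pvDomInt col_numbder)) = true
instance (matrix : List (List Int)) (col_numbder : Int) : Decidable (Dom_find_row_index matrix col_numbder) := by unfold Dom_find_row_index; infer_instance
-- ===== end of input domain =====

-- B re-implements A's single running-max loop as three stateless passes (map to |values|, max, first index);
-- equivalence is proved wherever Python A returns (Pre_ excludes only the inputs where A raises IndexError).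

-- abs(matrix[i][col]) ; exact under Pre_ (all accesses in range, Python negative indexing via pyGetD)
def absAt (matrix : List (List Int)) (i col : Int) : Int :=
  |PySem.List.pyGetD (PySem.List.pyGetD matrix i []) col 0|

-- ===== PORT A =====
def find_row_index (matrix : List (List Int)) (col_numbder : Int) : Option Int :=
  if col_numbder > (matrix.length : Int) - 1 then none
  else
    let r := (PySem.List.pyRange col_numbder (matrix.length : Int) 1).foldl
      (fun (s : Int × Int) i =>
        if absAt matrix i col_numbder > s.1 then (absAt matrix i col_numbder, i) else s)
      (absAt matrix col_numbder col_numbder, col_numbder)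
    some r.2

-- ===== PORT B =====
def find_row_index_alt (matrix : List (List Int)) (col_numbder : Int) : Option Int :=
  if col_numbder > (matrix.length : Int) - 1 then none
  else
    let col_abs := (PySem.List.pyRange col_numbder (matrix.length : Int) 1).map
      (fun i => absAt matrix i col_numbder)
    match PySem.List.max? col_abs (fun x => x) with
    | none => none
    | some m => (PySem.List.index? col_abs m).map (fun k => col_numbder + (k : Int))

-- ===== PRECONDITION & SPEC =====
-- Pre_ excludes exactly the inputs where Python A raises IndexError (a row the loop visits that
-- is too short at the column — rows from col_numbder on for col_numbder ≥ 0, every row for a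
-- negative col_numbder — or a column index below -len(matrix)); A returns no value there.
def Pre_find_row_index (matrix : List (List Int)) (col_numbder : Int) : Prop :=
  (matrix.length : Int) - 1 < col_numbder ∨
    (if col_numbder < 0 then
      -(matrix.length : Int) ≤ col_numbder ∧
        ∀ row ∈ matrix, PySem.Raise.InRange row.length col_numbder
     else ∀ row ∈ matrix.drop col_numbder.toNat, PySem.Raise.InRange row.length col_numbder)
instance (matrix : List (List Int)) (col_numbder : Int) : Decidable (Pre_find_row_index matrix col_numbder) := by unfold Pre_find_row_index; infer_instance

def pvWitness_find_row_index : List (List Int) × Int := ([[3, -2], [-5, 4]], 0)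

def Spec_find_row_index (matrix : List (List Int)) (col_numbder : Int) (out : Option Int) : Prop := out = find_row_index_alt matrix col_numbder
instance (matrix : List (List Int)) (col_numbder : Int) (out : Option Int) : Decidable (Spec_find_row_index matrix col_numbder out) := by unfold Spec_find_row_index; infer_instance

-- ===== CLAIM (what is proved, stated in full; the proofs are below) =====
def Claim_equal_find_row_index : Prop := ∀ (matrix : List (List Int)) (col_numbder : Int), Dom_find_row_index matrix col_numbder → Pre_find_row_index matrix col_numbder → Spec_find_row_index matrix col_numbder (find_row_index matrix col_numbder)

-- ===== LEMMAS AND PROOFS =====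

-- Invariant of A's running-max fold over a strictly increasing index list whose members all
-- exceed the seed index j: either nothing beat v and the state is unchanged, or the result is
-- the value/index of the FIRST index of l achieving the overall maximum (strictly above v).
def runMax (f : Int → Int) (l : List Int) (s : Int × Int) : Int × Int :=
  l.foldl (fun s i => if f i > s.1 then (f i, i) else s) s

theorem foldA_inv (f : Int → Int) :
    ∀ (l : List Int) (v j : Int), l.Pairwise (· < ·) → (∀ i ∈ l, j < i) →
    (runMax f l (v, j) = (v, j) ∧ ∀ i ∈ l, f i ≤ v) ∨
    ((runMax f l (v, j)).2 ∈ l ∧ (runMax f l (v, j)).1 = f (runMax f l (v, j)).2 ∧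
      v < (runMax f l (v, j)).1 ∧ (∀ i ∈ l, f i ≤ (runMax f l (v, j)).1) ∧
      (∀ i ∈ l, i < (runMax f l (v, j)).2 → f i < (runMax f l (v, j)).1) ∧
      j < (runMax f l (v, j)).2) := by
  intro l
  induction l with
  | nil => intro v j _ _; left; exact ⟨rfl, by simp⟩
  | cons x t ih =>
    intro v j hpw hj
    have hxt : ∀ i ∈ t, x < i := by
      intro i hi; exact (List.pairwise_cons.mp hpw).1 i hi
    have hpwt : t.Pairwise (· < ·) := (List.pairwise_cons.mp hpw).2
    by_cases hx : f x > v
    · simp only [runMax, List.foldl_cons, if_pos hx] at *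
      rcases ih (f x) x hpwt hxt with ⟨heq, hle⟩ | ⟨hmem, hval, hlt, hle, hfirst, hjlt⟩
      · right
        rw [heq]
        refine ⟨List.mem_cons_self, rfl, hx, ?_, ?_, hj x List.mem_cons_self⟩
        · intro i hi
          rcases List.mem_cons.mp hi with rfl | h
          · exact le_refl _
          · exact hle i h
        · intro i hi hilt
          rcases List.mem_cons.mp hi with rfl | h
          · exact absurd hilt (lt_irrefl _)
          · exact absurd hilt (not_lt.mpr (le_of_lt (hxt i h)))
      · right
        refine ⟨List.mem_cons_of_mem x hmem, hval, lt_trans hx hlt, ?_, ?_, ?_⟩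
        · intro i hi
          rcases List.mem_cons.mp hi with h | h
          · subst h; exact le_of_lt hlt
          · exact hle i h
        · intro i hi hilt
          rcases List.mem_cons.mp hi with h | h
          · subst h; exact hlt
          · exact hfirst i h hilt
        · exact lt_trans (hj x List.mem_cons_self) hjlt
    · simp only [runMax, List.foldl_cons, if_neg hx] at *
      have hjt : ∀ i ∈ t, j < i := fun i hi => lt_trans (hj x List.mem_cons_self) (hxt i hi)
      rcases ih v j hpwt hjt with ⟨heq, hle⟩ | ⟨hmem, hval, hlt, hle, hfirst, hjlt⟩
      · left
        refine ⟨heq, ?_⟩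
        intro i hi
        rcases List.mem_cons.mp hi with h | h
        · subst h; exact not_lt.mp hx
        · exact hle i h
      · right
        refine ⟨List.mem_cons_of_mem x hmem, hval, hlt, ?_, ?_, hjlt⟩
        · intro i hi
          rcases List.mem_cons.mp hi with h | h
          · subst h; exact le_trans (not_lt.mp hx) (le_of_lt hlt)
          · exact hle i h
        · intro i hi hilt
          rcases List.mem_cons.mp hi with h | h
          · subst h; exact lt_of_le_of_lt (not_lt.mp hx) hlt
          · exact hfirst i h hilt

theorem find_row_index_spec_aux (matrix : List (List Int)) (col : Int)
    (hcol : ¬ ((matrix.length : Int) - 1 < col)) :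
    find_row_index matrix col = find_row_index_alt matrix col := by
  set n : Int := (matrix.length : Int) with hn
  have hlt : col < n := by omega
  set f : Int → Int := fun i => absAt matrix i col with hf
  -- the full range is col :: tail
  have hsplit : PySem.List.pyRange col n 1 = col :: PySem.List.pyRange (col + 1) n 1 :=
    PySem.List.pyRange_one_cons hlt
  set t : List Int := PySem.List.pyRange (col + 1) n 1 with ht
  set xs : List Int := (PySem.List.pyRange col n 1).map f with hxs
  have hxs_cons : xs = f col :: t.map f := by rw [hxs, hsplit, List.map_cons]
  have hpwt : t.Pairwise (· < ·) := PySem.List.pairwise_lt_pyRange_one _ _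
  have hmt : ∀ i ∈ t, col < i := by
    intro i hi
    have := (PySem.List.mem_pyRange_one.mp hi).1
    omega
  -- A's fold after absorbing the first (no-op) step
  have hA : find_row_index matrix col = some (runMax f t (f col, col)).2 := by
    simp only [find_row_index, if_neg hcol, hsplit, List.foldl_cons, gt_iff_lt, lt_irrefl,
      if_false, ← hn, runMax]
    rfl
  rcases foldA_inv f t (f col) col hpwt hmt with ⟨heq, hle⟩ | ⟨hmem, hval, hlt', hle, hfirst, hjlt⟩
  · -- no element beats f col: A returns col; B's max is f col at index 0
    have hmax : PySem.List.max? xs (fun x => x) = some (f col) := by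
      rw [hxs_cons]
      have : ∀ y ∈ t.map f, y ≤ f col := by
        intro y hy
        obtain ⟨i, hi, rfl⟩ := List.mem_map.mp hy
        exact hle i hi
      -- max? of a cons whose head dominates is the head
      rcases hmax' : PySem.List.max? (f col :: t.map f) (fun x => x) with _ | m
      · exact absurd hmax' (by simp [PySem.List.max?_eq_none_iff])
      · have hm_mem := PySem.List.max?_mem hmax'
        have hge := PySem.List.max?_isMax hmax' (f col) List.mem_cons_self
        have hle' : m ≤ f col := by
          rcases List.mem_cons.mp hm_mem with h | h
          · omega
          · exact this m h
        have : m = f col := le_antisymm hle' hge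
        rw [this]
    have hidx : PySem.List.index? xs (f col) = some 0 := by
      rw [hxs_cons]; exact PySem.List.index?_cons_self _ _
    rw [hA, heq]
    simp only [find_row_index_alt, if_neg hcol, ← hn, ← hf, ← hxs, hmax, hidx]
    norm_num
  · -- some element beats f col: A returns J := fold.2, B finds the same index
    set r := runMax f t (f col, col) with hr
    have hJn : r.2 < n := by
      have := (PySem.List.mem_pyRange_one.mp hmem).2; omega
    -- r.1 is the max of xs
    have hub : ∀ y ∈ xs, y ≤ r.1 := by
      intro y hy
      rw [hxs_cons] at hy
      rcases List.mem_cons.mp hy with h | h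
      · subst h; exact le_of_lt hlt'
      · obtain ⟨i, hi, rfl⟩ := List.mem_map.mp h
        exact hle i hi
    have hmemxs : r.1 ∈ xs := by
      rw [hxs_cons]
      exact List.mem_cons_of_mem _ (List.mem_map.mpr ⟨r.2, hmem, hval.symm⟩)
    have hmax : PySem.List.max? xs (fun x => x) = some r.1 := by
      rcases hmax' : PySem.List.max? xs (fun x => x) with _ | m
      · rw [PySem.List.max?_eq_none_iff] at hmax'
        rw [hmax'] at hmemxs; exact absurd hmemxs (List.not_mem_nil)
      · have hm_mem := PySem.List.max?_mem hmax'
        have := PySem.List.max?_isMax hmax' r.1 hmemxs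
        have := hub m hm_mem
        have : m = r.1 := by omega
        rw [this]
    -- index? finds some k
    rcases hidx : PySem.List.index? xs r.1 with _ | k
    · rw [PySem.List.index?_eq_none_iff] at hidx
      exact absurd hmemxs hidx
    obtain ⟨hk, hxk, hbefore⟩ := PySem.List.getElem_of_index?_eq_some hidx
    have hlen : xs.length = (n - col).toNat := by
      rw [hxs, List.length_map, PySem.List.length_pyRange_one]
    have hxk' : f (col + (k : Int)) = r.1 := by
      simpa only [hxs, List.getElem_map, PySem.List.getElem_pyRange_one] using hxk
    -- col + k = r.2
    have hkey : col + (k : Int) = r.2 := by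
      by_contra hne
      rcases lt_or_gt_of_ne hne with hltk | hgtk
      · -- col+k < r.2 : firstness says f (col+k) < r.1, contradiction with hxk'
        have hck : col + (k : Int) = col ∨ col + (k : Int) ∈ t := by
          by_cases h0 : k = 0
          · left; simp [h0]
          · right
            rw [ht, PySem.List.mem_pyRange_one]
            constructor
            · omega
            · omega
        rcases hck with h | h
        · -- col+k = col: f col < r.1 but f (col+k) = r.1
          rw [h] at hxk'; omega
        · have := hfirst _ h hltk; omega
      · -- r.2 < col+k : position of r.2 in xs is before k yet holds r.1
        have hp : ((r.2 - col).toNat) < k := by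
          have h1 : col ≤ r.2 := le_of_lt hjlt
          omega
        have hpk : (r.2 - col).toNat < xs.length := by
          rw [hlen]; omega
        have : xs[(r.2 - col).toNat] = f r.2 := by
          simp only [hxs, List.getElem_map, PySem.List.getElem_pyRange_one]
          congr 1
          have : col ≤ r.2 := le_of_lt hjlt
          omega
        have hcontr := hbefore _ hp
        rw [this, ← hval] at hcontr
        exact hcontr rfl
    rw [hA]
    simp only [find_row_index_alt, if_neg hcol, ← hn, ← hf, ← hxs, hmax, hidx, Option.pure_def]
    exact congrArg some hkey.symm

-- ===== VERDICT (by name: the statement is the Claim_ definition above) =====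
theorem find_row_index_spec : Claim_equal_find_row_index := by
  intro matrix col _ _
  unfold Spec_find_row_index
  by_cases hcol : (matrix.length : Int) - 1 < col
  · have h : ((matrix.length : Int) - 1 < col) = True := by simp [hcol]
    simp [find_row_index, find_row_index_alt, gt_iff_lt, h]
  · exact find_row_index_spec_aux matrix col hcol
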